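-- pv_equiv track=rewrite | github.com/orentoled/Project | GUI.py | search_words_in_txt
-- ===== SOURCE A (Python) =====
-- def search_words_in_txt(text):
--     word = 'machine'
--     index = text.split().index(word)
--     position = 0
--     for i, word in enumerate(text):
--         position += (1 + len(word))
--         if i >= index:
--             break
--     return position
-- ===== SOURCE B (Python) =====
-- def search_words_in_txt(text):
--     index = text.split().index('machine')
--     return 2 * min(index + 1, len(text))
-- ===== Notes on version B (the rewrite author's own statement) =====
-- stated objective: simpler
-- what changed: The character-by-character accumulator loop (which always adds 2 per iteration, since the rebound loop variable is a single character) is replaced by the closed-form 2 * min(index + 1, len(text)).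
import Mathlib
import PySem

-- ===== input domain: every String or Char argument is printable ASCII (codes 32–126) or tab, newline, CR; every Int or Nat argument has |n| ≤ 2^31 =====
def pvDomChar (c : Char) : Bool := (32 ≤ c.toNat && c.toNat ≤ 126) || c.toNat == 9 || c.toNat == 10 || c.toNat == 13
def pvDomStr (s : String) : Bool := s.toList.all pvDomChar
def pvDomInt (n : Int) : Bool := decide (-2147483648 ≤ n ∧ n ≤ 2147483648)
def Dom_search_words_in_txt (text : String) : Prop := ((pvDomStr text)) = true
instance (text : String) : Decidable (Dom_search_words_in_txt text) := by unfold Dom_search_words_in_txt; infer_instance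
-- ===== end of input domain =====

-- B replaces A's per-character accumulator loop by the closed form 2 * min(index + 1, len(text)) (simpler; same split/index step).

-- ===== PORT A =====
-- the for-loop over enumerate(text): i counts, the break fires after adding when i >= index
def pvLoopA : List Char → Nat → Nat → Int → Int
  | [], _, _, position => position
  | c :: rest, i, index, position =>
    let position := position + (1 + PySem.Str.len (String.singleton c))
    if i ≥ index then position else pvLoopA rest (i + 1) index position

def search_words_in_txt (text : String) : Int :=
  let index := (PySem.List.index? (PySem.Str.split₀ text) "machine").getD 0
  pvLoopA text.toList 0 index 0

-- ===== PORT B =====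
def search_words_in_txt_alt (text : String) : Int :=
  let index := (PySem.List.index? (PySem.Str.split₀ text) "machine").getD 0
  2 * min ((index : Int) + 1) (PySem.Str.len text)

-- ===== PRECONDITION & SPEC =====
-- A raises ValueError when 'machine' is not a whitespace-split word of text (B does too); Pre_ excludes exactly that.
def Pre_search_words_in_txt (text : String) : Prop := "machine" ∈ PySem.Str.split₀ text
instance (text : String) : Decidable (Pre_search_words_in_txt text) := by unfold Pre_search_words_in_txt; infer_instance
def pvWitness_search_words_in_txt : String := "a machine b"

def Spec_search_words_in_txt (text : String) (out : Int) : Prop := out = search_words_in_txt_alt text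
instance (text : String) (out : Int) : Decidable (Spec_search_words_in_txt text out) := by unfold Spec_search_words_in_txt; infer_instance

-- ===== CLAIM (what is proved, stated in full; the proofs are below) =====
def Claim_equal_search_words_in_txt : Prop := ∀ (text : String), Dom_search_words_in_txt text → Pre_search_words_in_txt text → Spec_search_words_in_txt text (search_words_in_txt text)

-- ===== LEMMAS AND PROOFS =====
lemma pvLoopA_closed (cs : List Char) (i n : Nat) (position : Int) (h : i ≤ n) :
    pvLoopA cs i n position = position + 2 * min ((n : Int) + 1 - i) cs.length := by
  induction cs generalizing i position with
  | nil => simp [pvLoopA]; omega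
  | cons c rest ih =>
    simp only [pvLoopA, PySem.Str.len_eq, String.toList_singleton, List.length_singleton, List.length_nil,
      List.length_cons]
    by_cases hc : i ≥ n
    · have : i = n := le_antisymm h hc
      subst this
      simp only [ge_iff_le, le_refl, if_pos]
      push_cast
      omega
    · rw [if_neg hc, ih (i + 1) _ (by omega)]
      push_cast
      omega

-- ===== VERDICT (by name: the statement is the Claim_ definition above) =====
theorem search_words_in_txt_spec : Claim_equal_search_words_in_txt := by
  intro text _ _
  unfold Spec_search_words_in_txt search_words_in_txt search_words_in_txt_alt
  rw [pvLoopA_closed _ 0 _ 0 (Nat.zero_le _)]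
  simp [PySem.Str.len_eq]
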